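-- pv_equiv track=rewrite | github.com/henmitch/advent | 2023/code/day12_0.py | generate_all
-- ===== SOURCE A (Python) =====
-- from typing import Iterator
--
-- def get_dot_counts(n_dots: int, n_groups: int) -> Iterator[list[int]]:
--     if n_groups == 1:
--         yield [n_dots]
--         return
--     for this_group in range(n_dots + 1):
--         for rest in get_dot_counts(n_dots - this_group, n_groups - 1):
--             yield [this_group] + rest
--
-- def generate_all(springs: str, groups: list[int]) -> list[str]:
--     l = len(springs)
--     blocks = [group*"#" for group in groups]
--     n_dots = l - sum(groups)
--     n_groups_of_dots = len(groups) + 1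
--     out = []
--     for dot_counts in get_dot_counts(n_dots, n_groups_of_dots):
--         if any(n == 0 for n in dot_counts[1:-1]):
--             continue
--         to_add = ""
--         for dots, block in zip(dot_counts, blocks):
--             to_add += dots*"." + block
--         out.append(to_add + dot_counts[-1]*".")
--     return out
-- ===== SOURCE B (Python) =====
-- def generate_all(springs: str, groups: list[int]) -> list[str]:
--     # Direct construction: give every interior gap its mandatory dot up front,
--     # then distribute the remaining dots freely; no generate-and-filter pass.
--     reduced = len(springs) - sum(groups) - max(len(groups) - 1, 0)
--
--     def build(gs, first, remaining, prefix):
--         if not gs: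
--             return [prefix + "." * remaining]
--         extra = 0 if first else 1
--         out = []
--         for d in range(remaining + 1):
--             out += build(gs[1:], False, remaining - d,
--                          prefix + "." * (d + extra) + "#" * gs[0])
--         return out
--
--     return build(groups, True, reduced, "")
-- ===== Notes on version B (the rewrite author's own statement) =====
-- stated objective: alternative
-- what changed: B replaces A's generate-and-filter (enumerate all compositions of the dots, then discard those with a zero interior gap) by direct construction: it reserves one mandatory dot per interior gap up front and recursively builds only the valid strings, so no filter pass exists.
import Mathlib
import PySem

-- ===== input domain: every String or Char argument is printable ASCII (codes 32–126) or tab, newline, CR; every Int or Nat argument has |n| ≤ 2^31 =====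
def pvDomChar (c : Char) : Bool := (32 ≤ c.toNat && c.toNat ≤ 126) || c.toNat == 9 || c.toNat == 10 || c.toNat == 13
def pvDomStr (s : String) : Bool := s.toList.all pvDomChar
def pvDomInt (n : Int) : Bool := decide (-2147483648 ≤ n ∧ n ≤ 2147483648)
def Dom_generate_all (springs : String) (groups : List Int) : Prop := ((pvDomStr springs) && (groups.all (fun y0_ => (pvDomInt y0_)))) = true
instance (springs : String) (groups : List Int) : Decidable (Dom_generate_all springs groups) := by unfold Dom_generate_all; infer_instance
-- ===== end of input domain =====

-- B replaces A's generate-and-filter composition enumeration by direct construction of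
-- only the valid arrangements (one mandatory dot per interior gap reserved up front);
-- same return value, no speed claim.

-- ===== PORT A =====
-- shared string-repetition helpers: Python's n*"." and n*"#"
def pvDots (n : Int) : List Char := PySem.List.pyRepeat ['.'] n
def pvHashes (g : Int) : List Char := PySem.List.pyRepeat ['#'] g

-- get_dot_counts; the n_groups counter is a Nat because generate_all only calls it with
-- len(groups)+1 ≥ 1 (on n_groups ≤ 0 the Python generator would recurse forever).
def get_dot_counts : Int → Nat → List (List Int)
  | _, 0 => []
  | nd, 1 => [[nd]]
  | nd, (k+2) =>
      (PySem.List.pyRange 0 (nd+1) 1).flatMap (fun this_group =>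
        (get_dot_counts (nd - this_group) (k+1)).map (fun rest => this_group :: rest))

def generate_all (springs : String) (groups : List Int) : List String :=
  let l : Int := PySem.Str.len springs
  let blocks : List (List Char) := groups.map (fun g => pvHashes g)
  let n_dots : Int := l - groups.sum
  let n_groups_of_dots : Nat := groups.length + 1
  (get_dot_counts n_dots n_groups_of_dots).foldl
    (fun out dc =>
      if (PySem.List.slice dc (some 1) (some (-1))).any (fun n => n == 0) then out
      else
        let to_add : List Char :=
          (dc.zip blocks).foldl (fun acc p => acc ++ pvDots p.1 ++ p.2) []
        out ++ [String.ofList (to_add ++ pvDots (PySem.List.pyGetD dc (-1) 0))])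
    []

-- ===== PORT B =====
def pvBuild : List Int → Bool → Int → List Char → List String
  | [], _, remaining, pre => [String.ofList (pre ++ pvDots remaining)]
  | g :: gs, first, remaining, pre =>
      let extra : Int := if first then 0 else 1
      (PySem.List.pyRange 0 (remaining+1) 1).flatMap (fun d =>
        pvBuild gs false (remaining - d) (pre ++ pvDots (d + extra) ++ pvHashes g))

def generate_all_alt (springs : String) (groups : List Int) : List String :=
  let reduced : Int := PySem.Str.len springs - groups.sum - max ((groups.length : Int) - 1) 0
  pvBuild groups true reduced []

-- ===== PRECONDITION & SPEC =====
def Spec_generate_all (springs : String) (groups : List Int) (out : List String) : Prop := out = generate_all_alt springs groups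
instance (springs : String) (groups : List Int) (out : List String) : Decidable (Spec_generate_all springs groups out) := by unfold Spec_generate_all; infer_instance

-- ===== CLAIM (what is proved, stated in full; the proofs are below) =====
def Claim_equal_generate_all : Prop := ∀ (springs : String) (groups : List Int), Dom_generate_all springs groups → Spec_generate_all springs groups (generate_all springs groups)

-- ===== LEMMAS AND PROOFS =====

-- "no zero among the non-exempt entries" of a dot-count list: the last entry is always
-- exempt, and the head is exempt too when `first` (it is the leading gap).
def pvOk : Bool → List Int → Bool
  | _, [] => true
  | _, [_] => true
  | first, d :: rest => (first || d != 0) && pvOk false rest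

-- mandatory interior dots still owed from this point of B's recursion
def pvShift : List Int → Bool → Int
  | [], _ => 0
  | gs, first => if first then (gs.length : Int) - 1 else (gs.length : Int)

-- A's rendering of one dot-count list against the blocks, as a structural recursion
def pvRender (pre : List Char) : List Int → List Int → String
  | [d], [] => String.ofList (pre ++ pvDots d)
  | d :: dc, g :: gs => pvRender (pre ++ pvDots d ++ pvHashes g) dc gs
  | _, _ => String.ofList pre

lemma pv_slice_one_neg_one (dc : List Int) :
    PySem.List.slice dc (some 1) (some (-1)) = dc.tail.dropLast := by
  cases dc with
  | nil => simp [PySem.List.slice, PySem.List.clampIdx]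
  | cons d rest =>
      simp [PySem.List.slice, PySem.List.clampIdx, List.dropLast_eq_take]
      rw [if_neg (by omega)]
      omega

lemma pvOk_false_eq : ∀ (dc : List Int),
    pvOk false dc = !(dc.dropLast.any (fun n => n == 0)) := by
  intro dc
  induction dc with
  | nil => rfl
  | cons d rest ih =>
      cases rest with
      | nil => rfl
      | cons e r =>
        simp only [pvOk, ih, List.dropLast_cons_of_ne_nil (by simp : (e::r) ≠ []), List.any_cons]
        cases h : (d == (0:Int)) <;> simp [bne, h]

lemma pvOk_true_cons (d : Int) (rest : List Int) :
    pvOk true (d :: rest) = pvOk false rest := by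
  cases rest with
  | nil => rfl
  | cons e r => simp [pvOk]

lemma pvOk_cons_cons (first : Bool) (t e : Int) (r : List Int) :
    pvOk first (t :: e :: r) = ((first || t != 0) && pvOk false (e :: r)) := rfl

lemma pv_flatMap_congr {α β : Type} (l : List α) (f g : α → List β)
    (h : ∀ x ∈ l, f x = g x) : l.flatMap f = l.flatMap g := by
  simp only [List.flatMap]
  rw [List.map_congr_left h]

lemma pv_gdc_len : ∀ (k : Nat) (nd : Int) (dc : List Int),
    dc ∈ get_dot_counts nd (k+1) → dc.length = k+1 := by
  intro k
  induction k with
  | zero => intro nd dc h; simp [get_dot_counts] at h; simp [h]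
  | succ k ih =>
      intro nd dc h
      simp only [get_dot_counts, List.mem_flatMap, List.mem_map] at h
      obtain ⟨t, _, rest, hrest, rfl⟩ := h
      simp [ih _ _ hrest]

lemma pvBuild_neg (g : Int) (gs : List Int) (first : Bool) (r : Int) (pre : List Char)
    (h : r < 0) : pvBuild (g :: gs) first r pre = [] := by
  simp [pvBuild, PySem.List.pyRange_one_eq_nil (by omega : r + 1 ≤ 0)]

lemma pv_filter_map_cons (L : List (List Int)) (t : Int) (first : Bool)
    (h : ∀ r ∈ L, r ≠ []) :
    (L.map (t :: ·)).filter (pvOk first)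
      = if first || t != 0 then (L.filter (pvOk false)).map (t :: ·) else [] := by
  induction L with
  | nil => simp
  | cons r L ih =>
      have hr : r ≠ [] := h r (by simp)
      obtain ⟨e, r', rfl⟩ := List.exists_cons_of_ne_nil hr
      have ih' := ih (fun x hx => h x (by simp [hx]))
      simp only [List.map_cons, List.filter_cons, pvOk_cons_cons, ih']
      cases hc : (first || t != 0) <;> cases hq : pvOk false (e :: r') <;> simp

lemma pv_render_zipfold : ∀ (dc gs : List Int) (pre : List Char),
    dc.length = gs.length + 1 →
    String.ofList (((dc.zip (gs.map (fun g => pvHashes g))).foldl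
        (fun acc p => acc ++ pvDots p.1 ++ p.2) pre)
      ++ pvDots (PySem.List.pyGetD dc (-1) 0)) = pvRender pre dc gs := by
  intro dc
  induction dc with
  | nil => intro gs pre h; simp at h
  | cons d dc' ih =>
      intro gs pre h
      cases gs with
      | nil =>
          have : dc' = [] := by
            cases dc' with
            | nil => rfl
            | cons _ _ => simp at h
          subst this
          simp only [pvRender]
          rw [PySem.List.pyGetD_neg_one [d] 0 (by simp)]
          rfl
      | cons g gs' =>
          have hne : dc' ≠ [] := by
            cases dc' with
            | nil => simp at h
            | cons _ _ => simp
          simp only [List.map_cons, List.zip_cons_cons, List.foldl_cons, pvRender]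
          rw [PySem.List.pyGetD_neg_one (d :: dc') 0 (by simp),
              List.getLast_cons hne, ← PySem.List.pyGetD_neg_one dc' 0 hne]
          exact ih gs' (pre ++ pvDots d ++ pvHashes g) (by simp at h ⊢; omega)

lemma pv_trunc (f : Int → List String) (a b c : Int) (hbc : b ≤ c)
    (h : ∀ t, b ≤ t → t < c → f t = []) :
    (PySem.List.pyRange a c 1).flatMap f = (PySem.List.pyRange a b 1).flatMap f := by
  rcases (by omega : a ≤ b ∨ b < a) with hab | hab
  · rw [PySem.List.pyRange_one_append a b c hab hbc, List.flatMap_append]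
    have : (PySem.List.pyRange b c 1).flatMap f = [] := by
      apply List.flatMap_eq_nil_iff.mpr
      intro t ht
      rw [PySem.List.mem_pyRange_one] at ht
      exact h t ht.1 ht.2
    simp [this]
  · rw [PySem.List.pyRange_one_eq_nil (le_of_lt hab)]
    simp
    intro t h1 h2
    exact h t (by omega) h2

lemma pv_reindex (f : Int → List String) (b : Int) :
    (PySem.List.pyRange 1 (b+1) 1).flatMap f
      = (PySem.List.pyRange 0 b 1).flatMap (fun d => f (d+1)) := by
  rw [PySem.List.pyRange_one, PySem.List.pyRange_one]
  have hb : (b + 1 - 1).toNat = (b - 0).toNat := by omega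
  rw [hb, List.flatMap_map, List.flatMap_map]
  congr 1
  funext k
  congr 1
  omega

lemma pv_drop_zero (f : Int → List String) (c : Int) :
    (PySem.List.pyRange 0 c 1).flatMap (fun t => if t != 0 then f t else [])
      = (PySem.List.pyRange 1 c 1).flatMap f := by
  rcases (by omega : c ≤ 0 ∨ 0 < c) with hc | hc
  · rw [PySem.List.pyRange_one_eq_nil (by omega), PySem.List.pyRange_one_eq_nil (by omega)]
    rfl
  · rw [PySem.List.pyRange_one_cons hc, List.flatMap_cons]
    have h0 : (if (0:Int) != 0 then f 0 else []) = [] := by simp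
    rw [h0, List.nil_append]
    apply pv_flatMap_congr
    intro t ht
    rw [PySem.List.mem_pyRange_one] at ht
    rw [if_pos (by simp; omega)]

lemma pv_step (g : Int) (gs' : List Int) (first : Bool) (nd : Int) (pre : List Char) :
    (PySem.List.pyRange 0 (nd+1) 1).flatMap (fun t =>
        if first || t != 0 then
          pvBuild gs' false (nd - pvShift gs' false - t) (pre ++ pvDots t ++ pvHashes g)
        else [])
      = pvBuild (g :: gs') first (nd - pvShift (g :: gs') first) pre := by
  have hF0 : ∀ t : Int, gs' ≠ [] → nd - pvShift gs' false - t < 0 →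
      pvBuild gs' false (nd - pvShift gs' false - t) (pre ++ pvDots t ++ pvHashes g) = [] := by
    intro t hne hlt
    obtain ⟨a, b, rfl⟩ := List.exists_cons_of_ne_nil hne
    exact pvBuild_neg a b false _ _ hlt
  have hs'eq : pvShift gs' false = (if gs' = [] then (0:Int) else (gs'.length : Int)) := by
    cases gs' <;> simp [pvShift]
  cases first with
  | true =>
      simp only [Bool.true_or, if_pos]
      simp only [pvBuild, reduceIte, add_zero]
      have hsh : nd - pvShift (g :: gs') true = nd - (gs'.length : Int) := by
        simp [pvShift]
      rw [hsh]
      cases gs' with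
      | nil =>
          rw [hs'eq]
          simp
      | cons a b =>
          rw [pv_trunc _ 0 (nd - ((a::b).length:Int) + 1) (nd + 1)
              (by simp; omega)
              (by intro t h1 h2
                  have := hF0 t (by simp) (by rw [hs'eq]; simp at h1 ⊢; omega)
                  rw [hs'eq] at this
                  simpa using this)]
          apply pv_flatMap_congr
          intro d _
          rw [hs'eq]
          simp
  | false =>
      simp only [Bool.false_or]
      rw [pv_drop_zero]
      simp only [pvBuild, Bool.false_eq_true, if_false]
      have hsh : nd - pvShift (g :: gs') false = nd - (gs'.length : Int) - 1 := by
        simp [pvShift]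
        ring
      rw [hsh]
      have harith : ∀ d : Int, nd - (gs'.length:Int) - 1 - d = nd - pvShift gs' false - (d+1) := by
        intro d
        rw [hs'eq]
        split_ifs with hh
        · subst hh; simp; ring
        · ring
      have hrw : (fun d => pvBuild gs' false (nd - (gs'.length:Int) - 1 - d)
            (pre ++ pvDots (d + 1) ++ pvHashes g))
          = (fun d => (fun t => pvBuild gs' false (nd - pvShift gs' false - t)
            (pre ++ pvDots t ++ pvHashes g)) (d+1)) := by
        funext d
        rw [harith d]
      rw [hrw, ← pv_reindex (fun t => pvBuild gs' false (nd - pvShift gs' false - t)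
            (pre ++ pvDots t ++ pvHashes g)) (nd - (gs'.length:Int) - 1 + 1)]
      rw [pv_trunc _ 1 (nd - (gs'.length:Int) - 1 + 1 + 1) (nd + 1) (by omega)
          (by intro t h1 h2
              cases gs' with
              | nil => simp at h1 h2; omega
              | cons a b =>
                  apply hF0 t (by simp)
                  rw [hs'eq]
                  simp at h1 ⊢
                  omega)]

lemma pv_main : ∀ (gs : List Int) (first : Bool) (nd : Int) (pre : List Char),
    ((get_dot_counts nd (gs.length+1)).filter (pvOk first)).map
        (fun dc => pvRender pre dc gs)
      = pvBuild gs first (nd - pvShift gs first) pre := by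
  intro gs
  induction gs with
  | nil =>
      intro first nd pre
      have h2 : pvOk first [nd] = true := by cases first <;> rfl
      simp [get_dot_counts, h2, pvRender, pvBuild, pvShift]
  | cons g gs' ih =>
      intro first nd pre
      have h1 : get_dot_counts nd ((g :: gs').length + 1)
          = (PySem.List.pyRange 0 (nd+1) 1).flatMap (fun t =>
              (get_dot_counts (nd - t) (gs'.length+1)).map (fun rest => t :: rest)) := rfl
      rw [h1, List.filter_flatMap, List.map_flatMap]
      rw [pv_flatMap_congr _ _ (fun t =>
          if first || t != 0 then
            pvBuild gs' false (nd - pvShift gs' false - t) (pre ++ pvDots t ++ pvHashes g)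
          else [])]
      · exact pv_step g gs' first nd pre
      · intro t _
        rw [pv_filter_map_cons _ t first (fun r hr => by
              have := pv_gdc_len gs'.length (nd - t) r hr
              intro hnil
              rw [hnil] at this
              simp at this)]
        cases hc : (first || t != 0) with
        | false => simp
        | true =>
            simp only [if_pos]
            rw [List.map_map]
            have hcomp : ((fun dc => pvRender pre dc (g :: gs')) ∘ (t :: ·))
                = fun rest => pvRender (pre ++ pvDots t ++ pvHashes g) rest gs' := by
              funext rest
              simp [pvRender]
            rw [hcomp, ih false (nd - t) (pre ++ pvDots t ++ pvHashes g)]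
            have : nd - t - pvShift gs' false = nd - pvShift gs' false - t := by ring
            rw [this]

lemma pv_genA_eq (springs : String) (groups : List Int) :
    generate_all springs groups
      = ((get_dot_counts (PySem.Str.len springs - groups.sum) (groups.length+1)).filter
          (pvOk true)).map (fun dc => pvRender [] dc groups) := by
  unfold generate_all
  dsimp only []
  rw [show (fun (out : List String) dc =>
        if (PySem.List.slice dc (some 1) (some (-1))).any (fun n => n == 0) then out
        else out ++ [String.ofList
          (((dc.zip (groups.map (fun g => pvHashes g))).foldl
              (fun acc p => acc ++ pvDots p.1 ++ p.2) [])
            ++ pvDots (PySem.List.pyGetD dc (-1) 0))])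
      = (fun out dc =>
          if !((PySem.List.slice dc (some 1) (some (-1))).any (fun n => n == 0)) then
            out ++ [String.ofList
              (((dc.zip (groups.map (fun g => pvHashes g))).foldl
                  (fun acc p => acc ++ pvDots p.1 ++ p.2) [])
                ++ pvDots (PySem.List.pyGetD dc (-1) 0))]
          else out) from by
        funext out dc
        cases h : (PySem.List.slice dc (some 1) (some (-1))).any (fun n => n == 0) with
        | true => simp
        | false => simp]
  rw [PySem.List.foldl_append_if, List.nil_append]
  have hfilter : List.filter
        (fun dc => !((PySem.List.slice dc (some 1) (some (-1))).any (fun n => n == 0)))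
        (get_dot_counts (PySem.Str.len springs - groups.sum) (groups.length+1))
      = List.filter (pvOk true)
        (get_dot_counts (PySem.Str.len springs - groups.sum) (groups.length+1)) := by
    apply List.filter_congr
    intro dc hdc
    have hlen := pv_gdc_len groups.length _ dc hdc
    obtain ⟨d, rest, rfl⟩ := List.exists_cons_of_ne_nil
      (by intro hnil; rw [hnil] at hlen; simp at hlen : dc ≠ [])
    rw [pv_slice_one_neg_one, pvOk_true_cons, pvOk_false_eq]
    simp
  rw [hfilter]
  apply List.map_congr_left
  intro dc hdc
  exact pv_render_zipfold dc groups [] (pv_gdc_len groups.length _ dc (List.mem_of_mem_filter hdc))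

-- ===== VERDICT (by name: the statement is the Claim_ definition above) =====
theorem generate_all_spec : Claim_equal_generate_all := by
  intro springs groups _
  unfold Spec_generate_all generate_all_alt
  rw [pv_genA_eq, pv_main]
  congr 1
  cases groups with
  | nil => simp [pvShift]
  | cons g gs =>
      simp only [pvShift, List.length_cons]
      push_cast
      omega
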